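-- pv_equiv track=rewrite | github.com/supriya-SikkaAI/LLM_APPLICATIONHACKATHON | main.py | determine_agent_from_input
-- ===== SOURCE A (Python) =====
-- def determine_agent_from_input(user_input):
--     """Determine which agent to call based on the user's input."""
--     user_input = user_input.lower()
--
--     # Simple keyword matching to route to the appropriate agent
--     if any(keyword in user_input.lower() for keyword in ["reputation", "repu", "repo", "reviews", "feedback","reputacion", "repotation", "reputition","reputatoin", "reputasion", "repoutation", "repputation"]):
--         return 'reputation_management'
--     elif any(keyword in user_input.lower() for keyword in ["payment", "payments", "pay", "transaction", "payments system","pament", "pymant", "paymant", "paymet", "transction", "tranaction", "trasaction","billing", "invoice", "checkout", "gateway"]):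
--         return 'payment'
--     elif any(keyword in user_input.lower() for keyword in ["communication", "comm", "chat", "messages", "patient communication system","comunication", "comms", "msg","messaging", "text", "sms", "email", "call", "notification"]):
--         return 'communication'
--     elif any(keyword in user_input.lower() for keyword in ["business", "bussiness", "bus", "performance", "management","business performance management system", "performence", "managment", "perf", "kpi", "metrics", "analytics", "reporting", "strategy", "goals"]):
--         return 'business'
--     elif any(keyword in user_input.lower() for keyword in ["improve", "code", "generate", "more", "detailed","steps"]):
--         return 'follow_up'
--     else:
--         return None
-- ===== SOURCE B (Python) =====
-- AGENTS = ['reputation_management', 'payment', 'communication', 'business', 'follow_up']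
--
-- _GROUPS = [
--     ["reputation", "repu", "repo", "reviews", "feedback", "reputacion", "repotation", "reputition", "reputatoin", "reputasion", "repoutation", "repputation"],
--     ["payment", "payments", "pay", "transaction", "payments system", "pament", "pymant", "paymant", "paymet", "transction", "tranaction", "trasaction", "billing", "invoice", "checkout", "gateway"],
--     ["communication", "comm", "chat", "messages", "patient communication system", "comunication", "comms", "msg", "messaging", "text", "sms", "email", "call", "notification"],
--     ["business", "bussiness", "bus", "performance", "management", "business performance management system", "performence", "managment", "perf", "kpi", "metrics", "analytics", "reporting", "strategy", "goals"],
--     ["improve", "code", "generate", "more", "detailed", "steps"],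
-- ]
--
-- # Flat index: every keyword mapped to the priority rank of its agent group.
-- KEYWORD_RANK = {kw: rank for rank, kws in enumerate(_GROUPS) for kw in kws}
--
-- def determine_agent_from_input(user_input):
--     """Determine which agent to call based on the user's input."""
--     lowered = user_input.lower()
--     matched = [rank for kw, rank in KEYWORD_RANK.items() if kw in lowered]
--     return AGENTS[min(matched)] if matched else None
-- ===== Notes on version B (the rewrite author's own statement) =====
-- stated objective: alternative
-- what changed: Replaces the five-way if/elif chain of any-scans with a flat keyword-to-rank index built once: B filters the index for keywords occurring in the lowered input, takes the minimum rank, and looks the agent up in a table (no branch chain, no per-group any); B also lowers the input once where A re-lowers it in every branch.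
import Mathlib
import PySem

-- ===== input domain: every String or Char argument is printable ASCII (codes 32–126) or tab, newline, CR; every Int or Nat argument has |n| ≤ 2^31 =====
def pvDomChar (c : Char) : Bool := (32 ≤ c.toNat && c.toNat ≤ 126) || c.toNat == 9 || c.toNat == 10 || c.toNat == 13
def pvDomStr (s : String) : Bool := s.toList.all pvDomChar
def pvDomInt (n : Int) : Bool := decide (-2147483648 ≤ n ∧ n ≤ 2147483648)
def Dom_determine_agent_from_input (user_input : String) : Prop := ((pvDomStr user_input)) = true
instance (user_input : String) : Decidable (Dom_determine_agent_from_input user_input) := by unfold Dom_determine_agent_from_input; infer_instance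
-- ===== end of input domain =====

-- B replaces A's five-way if/elif chain with a flat keyword→rank index: filter for occurring keywords, take the minimum rank, look the agent up (objective: alternative).

-- ===== PORT A =====
def determine_agent_from_input (user_input : String) : Option String :=
  let user_input := PySem.Str.lower user_input
  if ["reputation", "repu", "repo", "reviews", "feedback", "reputacion", "repotation", "reputition", "reputatoin", "reputasion", "repoutation", "repputation"].any
       (fun keyword => PySem.Str.isIn keyword (PySem.Str.lower user_input)) then
    some "reputation_management"
  else if ["payment", "payments", "pay", "transaction", "payments system", "pament", "pymant", "paymant", "paymet", "transction", "tranaction", "trasaction", "billing", "invoice", "checkout", "gateway"].any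
       (fun keyword => PySem.Str.isIn keyword (PySem.Str.lower user_input)) then
    some "payment"
  else if ["communication", "comm", "chat", "messages", "patient communication system", "comunication", "comms", "msg", "messaging", "text", "sms", "email", "call", "notification"].any
       (fun keyword => PySem.Str.isIn keyword (PySem.Str.lower user_input)) then
    some "communication"
  else if ["business", "bussiness", "bus", "performance", "management", "business performance management system", "performence", "managment", "perf", "kpi", "metrics", "analytics", "reporting", "strategy", "goals"].any
       (fun keyword => PySem.Str.isIn keyword (PySem.Str.lower user_input)) then
    some "business"
  else if ["improve", "code", "generate", "more", "detailed", "steps"].any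
       (fun keyword => PySem.Str.isIn keyword (PySem.Str.lower user_input)) then
    some "follow_up"
  else
    none

-- ===== PORT B =====
-- AGENTS table of Source B
def pvAgents : List String :=
  ["reputation_management", "payment", "communication", "business", "follow_up"]

-- _GROUPS of Source B
def pvGroupsB : List (List String) :=
  [ ["reputation", "repu", "repo", "reviews", "feedback", "reputacion", "repotation", "reputition", "reputatoin", "reputasion", "repoutation", "repputation"],
    ["payment", "payments", "pay", "transaction", "payments system", "pament", "pymant", "paymant", "paymet", "transction", "tranaction", "trasaction", "billing", "invoice", "checkout", "gateway"],
    ["communication", "comm", "chat", "messages", "patient communication system", "comunication", "comms", "msg", "messaging", "text", "sms", "email", "call", "notification"],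
    ["business", "bussiness", "bus", "performance", "management", "business performance management system", "performence", "managment", "perf", "kpi", "metrics", "analytics", "reporting", "strategy", "goals"],
    ["improve", "code", "generate", "more", "detailed", "steps"] ]

-- KEYWORD_RANK of Source B: a dict with (provably) distinct keyword keys, in insertion
-- order = an association list built by the same double comprehension over enumerate.
def pvKeywordRank : List (String × Int) :=
  (PySem.List.enumerate pvGroupsB).flatMap (fun rk => rk.2.map (fun kw => (kw, rk.1)))

def determine_agent_from_input_alt (user_input : String) : Option String :=
  let lowered := PySem.Str.lower user_input
  let matched := (pvKeywordRank.filter (fun p => PySem.Str.isIn p.1 lowered)).map Prod.snd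
  -- `AGENTS[min(matched)] if matched else None`; the rank is always 0..4, within
  -- range of AGENTS, so pyGet? returns `some` exactly where Python returns the entry.
  match PySem.List.min? matched (fun x => x) with
  | none => none
  | some r => PySem.List.pyGet? pvAgents r

-- ===== PRECONDITION & SPEC =====
def Spec_determine_agent_from_input (user_input : String) (out : Option String) : Prop := out = determine_agent_from_input_alt user_input
instance (user_input : String) (out : Option String) : Decidable (Spec_determine_agent_from_input user_input out) := by unfold Spec_determine_agent_from_input; infer_instance

-- ===== CLAIM (what is proved, stated in full; the proofs are below) =====
def Claim_equal_determine_agent_from_input : Prop := ∀ (user_input : String), Dom_determine_agent_from_input user_input → Spec_determine_agent_from_input user_input (determine_agent_from_input user_input)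

-- ===== LEMMAS AND PROOFS =====

-- lower is idempotent
theorem toNat_ofNat_small (n : Nat) (h : n < 55296) : (Char.ofNat n).toNat = n := by
  unfold Char.ofNat
  rw [dif_pos (Or.inl h : n.isValidChar)]
  simp [Char.ofNatAux, Char.toNat, UInt32.toNat_ofNatLT]

theorem lowerChar_idem (c : Char) : PySem.Chars.lowerChar (PySem.Chars.lowerChar c) = PySem.Chars.lowerChar c := by
  simp only [PySem.Chars.lowerChar, PySem.Chars.isupper, Bool.and_eq_true, decide_eq_true_eq]
  by_cases h : 'A' ≤ c ∧ c ≤ 'Z'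
  · rw [if_pos h, if_neg]
    intro hcontra
    have h1 : 65 ≤ c.toNat := by
      have := h.1; rw [Char.le_def, UInt32.le_iff_toNat_le] at this; exact this
    have h2 : c.toNat ≤ 90 := by
      have := h.2; rw [Char.le_def, UInt32.le_iff_toNat_le] at this; exact this
    have hd : (Char.ofNat (c.toNat + 32)).toNat = c.toNat + 32 := toNat_ofNat_small _ (by omega)
    have hle := hcontra.2
    rw [Char.le_def, UInt32.le_iff_toNat_le] at hle
    have hfin : c.toNat + 32 ≤ 90 := by rw [← hd]; exact hle
    omega
  · rw [if_neg h, if_neg h]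

theorem lower_idem (s : String) : PySem.Str.lower (PySem.Str.lower s) = PySem.Str.lower s := by
  apply String.ext
  simp [PySem.Str.toList_lower, PySem.Chars.lower, List.map_map, Function.comp, lowerChar_idem]

-- the foldl step hidden inside PySem.List.min? with the identity key, on Int
def pvMinStep (acc : Option Int) (x : Int) : Option Int :=
  match acc with
  | none => some x
  | some m => if x < m then some x else some m

theorem min?_eq_foldl (l : List Int) :
    PySem.List.min? l (fun x => x) = List.foldl pvMinStep none l := by
  simp only [PySem.List.min?]
  congr 1
  funext acc x
  cases acc <;> rfl

theorem pvMinStep_absorb (acc : Option Int) (r : Int) :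
    pvMinStep (pvMinStep acc r) r = pvMinStep acc r := by
  cases acc with
  | none => simp [pvMinStep]
  | some m =>
    by_cases h : r < m <;> simp [pvMinStep, h]

-- folding over one keyword group's segment of the index: first a fixpoint lemma …
theorem fold_seg_fix (g : List String) (r : Int) (low : String) (a : Option Int)
    (h : pvMinStep a r = a) :
    List.foldl pvMinStep a
      (((g.map (fun k => (k, r))).filter (fun q => PySem.Str.isIn q.1 low)).map Prod.snd) = a := by
  induction g with
  | nil => rfl
  | cons k g ih =>
    cases hk : PySem.Str.isIn k low with
    | true =>
      simp only [List.map_cons, List.filter_cons, hk, if_true, List.foldl_cons, h]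
      exact ih
    | false =>
      simp only [List.map_cons, List.filter_cons, hk, Bool.false_eq_true, if_false]
      exact ih

-- … then the segment lemma: one group contributes `pvMinStep acc r` iff it matches
theorem fold_seg (g : List String) (r : Int) (low : String) (acc : Option Int) :
    List.foldl pvMinStep acc
      (((g.map (fun k => (k, r))).filter (fun q => PySem.Str.isIn q.1 low)).map Prod.snd)
      = if g.any (fun k => PySem.Str.isIn k low) then pvMinStep acc r else acc := by
  induction g generalizing acc with
  | nil => rfl
  | cons k g ih =>
    cases hk : PySem.Str.isIn k low with
    | true =>
      simp only [List.map_cons, List.filter_cons, hk, if_true, List.foldl_cons, List.any_cons,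
        Bool.true_or]
      rw [fold_seg_fix g r low _ (pvMinStep_absorb acc r)]
    | false =>
      simp only [List.filter_cons, List.map_cons, hk, Bool.false_eq_true, if_false,
        List.any_cons, Bool.false_or]
      exact ih acc

-- the index splits into its five group segments
theorem keywordRank_eq :
    pvKeywordRank =
      (pvGroupsB[0]!.map (fun k => (k, (0 : Int)))) ++
      ((pvGroupsB[1]!.map (fun k => (k, (1 : Int)))) ++
      ((pvGroupsB[2]!.map (fun k => (k, (2 : Int)))) ++
      ((pvGroupsB[3]!.map (fun k => (k, (3 : Int)))) ++
      ((pvGroupsB[4]!.map (fun k => (k, (4 : Int)))) ++ [])))) := by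
  rfl

-- ===== VERDICT (by name: the statement is the Claim_ definition above) =====
theorem determine_agent_from_input_spec : Claim_equal_determine_agent_from_input := by
  intro user_input _
  unfold Spec_determine_agent_from_input determine_agent_from_input determine_agent_from_input_alt
  simp only [lower_idem]
  rw [keywordRank_eq, min?_eq_foldl]
  simp only [List.filter_append, List.map_append, List.foldl_append]
  rw [fold_seg, fold_seg, fold_seg, fold_seg, fold_seg]
  simp only [pvGroupsB, List.getElem!_cons_zero, List.getElem!_cons_succ, List.filter_nil,
    List.map_nil, List.foldl_nil]
  generalize (["reputation", "repu", "repo", "reviews", "feedback", "reputacion", "repotation", "reputition", "reputatoin", "reputasion", "repoutation", "repputation"] : List String).any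
      (fun k => PySem.Str.isIn k (PySem.Str.lower user_input)) = b0
  generalize (["payment", "payments", "pay", "transaction", "payments system", "pament", "pymant", "paymant", "paymet", "transction", "tranaction", "trasaction", "billing", "invoice", "checkout", "gateway"] : List String).any
      (fun k => PySem.Str.isIn k (PySem.Str.lower user_input)) = b1
  generalize (["communication", "comm", "chat", "messages", "patient communication system", "comunication", "comms", "msg", "messaging", "text", "sms", "email", "call", "notification"] : List String).any
      (fun k => PySem.Str.isIn k (PySem.Str.lower user_input)) = b2
  generalize (["business", "bussiness", "bus", "performance", "management", "business performance management system", "performence", "managment", "perf", "kpi", "metrics", "analytics", "reporting", "strategy", "goals"] : List String).any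
      (fun k => PySem.Str.isIn k (PySem.Str.lower user_input)) = b3
  generalize (["improve", "code", "generate", "more", "detailed", "steps"] : List String).any
      (fun k => PySem.Str.isIn k (PySem.Str.lower user_input)) = b4
  revert b0 b1 b2 b3 b4
  decide
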